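-- pv_equiv track=rewrite | github.com/Psych0h3ad/klipperbuddy | klipperbuddy.py | _is_generic_name
-- ===== SOURCE A (Python) =====
-- def _is_generic_name(name: str) -> bool:
--     """Check if name is a generic/default name that should be skipped"""
--     generic_names = [
--         'klipper', 'printer', 'mainsail', 'fluidd', 'localhost',
--         'raspberry', 'raspberrypi', 'pi', 'mks', 'btt',
--         'sonic', 'pad', 'host'
--     ]
--     name_lower = name.lower()
--     # Skip if it's just an IP address
--     if name_lower.replace('.', '').isdigit():
--         return True
--     # Skip generic names
--     for generic in generic_names:
--         if name_lower == generic or name_lower.startswith(generic + '-'):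
--             return True
--     return False
-- ===== SOURCE B (Python) =====
-- _GENERIC_NAMES = frozenset((
--     'klipper', 'printer', 'mainsail', 'fluidd', 'localhost',
--     'raspberry', 'raspberrypi', 'pi', 'mks', 'btt',
--     'sonic', 'pad', 'host'
-- ))
--
--
-- def _is_generic_name(name: str) -> bool:
--     """Check if name is a generic/default name that should be skipped"""
--     name_lower = name.lower()
--     # Skip if it's just an IP address
--     if name_lower.replace('.', '').isdigit():
--         return True
--     # Generic iff the first hyphen-delimited token is one of the generic names
--     i = name_lower.find('-')
--     head = name_lower if i < 0 else name_lower[:i]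
--     return head in _GENERIC_NAMES
-- ===== Notes on version B (the rewrite author's own statement) =====
-- stated objective: simpler
-- what changed: The 13-iteration loop of equality/startswith tests is replaced by computing the first hyphen-delimited token once and one frozenset membership test (valid since no generic name contains a hyphen).
import Mathlib
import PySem

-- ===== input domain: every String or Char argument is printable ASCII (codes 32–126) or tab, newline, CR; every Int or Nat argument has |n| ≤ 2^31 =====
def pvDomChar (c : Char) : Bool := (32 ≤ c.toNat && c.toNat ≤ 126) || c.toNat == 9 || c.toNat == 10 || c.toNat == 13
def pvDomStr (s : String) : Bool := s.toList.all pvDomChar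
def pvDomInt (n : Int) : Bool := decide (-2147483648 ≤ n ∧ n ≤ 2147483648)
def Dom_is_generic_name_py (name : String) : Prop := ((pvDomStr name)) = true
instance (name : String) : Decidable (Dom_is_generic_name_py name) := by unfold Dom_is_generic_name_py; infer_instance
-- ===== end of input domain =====

-- B replaces A's 13-iteration equality/startswith loop by one membership test of the
-- first hyphen-delimited token in a precomputed set (no generic name contains a hyphen).

-- ===== PORT A =====
def pvGenericNamesA : List (List Char) :=
  ["klipper".toList, "printer".toList, "mainsail".toList, "fluidd".toList, "localhost".toList,
   "raspberry".toList, "raspberrypi".toList, "pi".toList, "mks".toList, "btt".toList,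
   "sonic".toList, "pad".toList, "host".toList]

-- the 'for generic in generic_names' loop with its early returns
def pvLoopA (gs : List (List Char)) (nl : List Char) : Bool :=
  match gs with
  | [] => false
  | g :: rest =>
    if nl == g || PySem.Chars.startswith nl (g ++ ['-']) then true else pvLoopA rest nl

def is_generic_name_py (name : String) : Bool :=
  let nl := PySem.Chars.lower name.toList
  if PySem.Chars.strIsdigit (PySem.Chars.replace nl ['.'] []) then true
  else pvLoopA pvGenericNamesA nl

-- ===== PORT B =====
def pvGenericSet : PySem.Set (List Char) :=
  PySem.Set.ofList
    ["klipper".toList, "printer".toList, "mainsail".toList, "fluidd".toList, "localhost".toList,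
     "raspberry".toList, "raspberrypi".toList, "pi".toList, "mks".toList, "btt".toList,
     "sonic".toList, "pad".toList, "host".toList]

def is_generic_name_py_alt (name : String) : Bool :=
  let nl := PySem.Chars.lower name.toList
  if PySem.Chars.strIsdigit (PySem.Chars.replace nl ['.'] []) then true
  else
    let i := PySem.Chars.find nl ['-']
    let head := if i < 0 then nl else PySem.Chars.slice nl none (some i)
    PySem.Set.contains pvGenericSet head

-- ===== PRECONDITION & SPEC =====
def Spec_is_generic_name_py (name : String) (out : Bool) : Prop := out = is_generic_name_py_alt name
instance (name : String) (out : Bool) : Decidable (Spec_is_generic_name_py name out) := by unfold Spec_is_generic_name_py; infer_instance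

-- ===== CLAIM (what is proved, stated in full; the proofs are below) =====
def Claim_equal_is_generic_name_py : Prop := ∀ (name : String), Dom_is_generic_name_py name → Spec_is_generic_name_py name (is_generic_name_py name)

-- ===== LEMMAS AND PROOFS =====

-- a singleton is a prefix iff it is the head
lemma pv_singleton_prefix_iff (c : Char) (l : List Char) : [c] <+: l ↔ l.head? = some c := by
  cases l with
  | nil => simp
  | cons x t =>
    constructor
    · rintro ⟨s, hs⟩; simp at hs; simp [hs.1]
    · intro h; simp at h; exact ⟨t, by simp [h]⟩

-- take at the first occurrence of '-' is takeWhile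
lemma pv_take_eq_takeWhile (nl : List Char) (k : Nat)
    (hk : k < nl.length) (hat : nl[k] = '-')
    (hbefore : ∀ j (hj : j < k), nl[j]'(by omega) ≠ '-') :
    nl.takeWhile (fun c => c != '-') = nl.take k := by
  induction nl generalizing k with
  | nil => simp at hk
  | cons x t ih =>
    cases k with
    | zero => simp at hat; simp [List.takeWhile, hat]
    | succ m =>
      have hx : x ≠ '-' := by
        have := hbefore 0 (by omega); simpa using this
      simp only [List.takeWhile_cons, bne_iff_ne, ne_eq, hx, not_false_eq_true, decide_true,
        List.take_succ_cons]
      have := ih m (by simpa using hk) (by simpa using hat)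
        (fun j hj => by simpa using hbefore (j+1) (by omega))
      simp only [bne_iff_ne, ne_eq] at this
      simp [this]

-- B's head computation is takeWhile (· != '-')
lemma pv_head_eq (nl : List Char) :
    (if PySem.Chars.find nl ['-'] < 0 then nl
     else PySem.Chars.slice nl none (some (PySem.Chars.find nl ['-']))) =
    nl.takeWhile (fun c => c != '-') := by
  by_cases h : PySem.Chars.find nl ['-'] < 0
  · simp only [h, if_true]
    have hnone : ¬ ['-'] <:+: nl := by
      apply (PySem.Chars.find_eq_neg_one_iff nl ['-']).mp
      have := PySem.Chars.neg_one_le_find nl ['-']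
      omega
    have hmem : '-' ∉ nl := fun hm => hnone ((List.singleton_infix_iff _ _).mpr hm)
    exact (List.takeWhile_eq_self_iff.mpr (fun a ha => by
      simp only [bne_iff_ne, ne_eq, decide_eq_true_eq]
      exact fun he => hmem (he ▸ ha))).symm
  · push_neg at h
    have hspec := PySem.Chars.find_spec (s := nl) (sub := ['-']) h
    obtain ⟨hpre, hmin⟩ := hspec
    set k := (PySem.Chars.find nl ['-']).toNat with hkdef
    have hslice : PySem.Chars.slice nl none (some (PySem.Chars.find nl ['-'])) = nl.take k := by
      rw [PySem.Chars.slice_eq_listSlice, PySem.List.slice_to nl h]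
    have hhead : (nl.drop k).head? = some '-' := (pv_singleton_prefix_iff _ _).mp hpre
    have hklt : k < nl.length := by
      by_contra hge
      push_neg at hge
      rw [List.drop_eq_nil_of_le hge] at hhead
      simp at hhead
    have hat : nl[k] = '-' := by
      have := List.head?_drop (l := nl) (i := k)
      rw [hhead] at this
      have h2 : nl[k]? = some '-' := this.symm
      rw [List.getElem?_eq_getElem hklt] at h2
      exact Option.some.inj h2
    have hbefore : ∀ j (hj : j < k), nl[j]'(by omega) ≠ '-' := by
      intro j hj he
      apply hmin j hj
      rw [pv_singleton_prefix_iff, List.head?_drop, List.getElem?_eq_getElem (by omega), he]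
    simp only [h, if_neg (by omega : ¬ PySem.Chars.find nl ['-'] < 0)]
    rw [hslice, pv_take_eq_takeWhile nl k hklt hat hbefore]

-- the per-name test of A's loop equals comparing the head token, when g has no hyphen
lemma pv_key (nl g : List Char) (hg : '-' ∉ g) :
    (nl == g || PySem.Chars.startswith nl (g ++ ['-'])) =
    (nl.takeWhile (fun c => c != '-') == g) := by
  have hgself : g.takeWhile (fun c => c != '-') = g :=
    List.takeWhile_eq_self_iff.mpr (fun a ha => by
      simp only [bne_iff_ne, ne_eq, decide_eq_true_eq]
      exact fun hc => hg (hc ▸ ha))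
  cases h : (nl.takeWhile (fun c => c != '-') == g) with
  | false =>
    simp only [beq_eq_false_iff_ne, ne_eq] at h
    simp only [Bool.or_eq_false_iff, beq_eq_false_iff_ne, ne_eq]
    refine ⟨fun he => h (by rw [he]; exact hgself), ?_⟩
    rw [PySem.Chars.startswith]
    apply Bool.eq_false_iff.mpr
    intro hp
    obtain ⟨t, ht⟩ := List.isPrefixOf_iff_prefix.mp hp
    apply h
    rw [← ht, List.append_assoc, List.singleton_append, List.takeWhile_append]
    simp [hgself]
  | true =>
    have hgeq : nl.takeWhile (fun c => c != '-') = g := by simpa using h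
    have hsplit := List.takeWhile_append_dropWhile (p := fun c => c != '-') (l := nl)
    cases hdrop : nl.dropWhile (fun c => c != '-') with
    | nil =>
      have hnl : nl = g := by rw [← hsplit, hdrop, hgeq, List.append_nil]
      simp [hnl]
    | cons d t =>
      have hd : d = '-' := by
        have := List.head?_dropWhile_not (p := fun c => c != '-') (l := nl)
        rw [hdrop] at this
        simpa using this
      have heq : g ++ '-' :: t = nl := by rw [← hsplit, hdrop, hgeq, hd]
      have hpre : g ++ ['-'] <+: nl := by
        rw [← heq]
        exact ⟨t, by simp⟩
      simp [PySem.Chars.startswith, List.isPrefixOf_iff_prefix.mpr hpre]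

-- A's loop is membership of the head token
lemma pv_loop_eq (gs : List (List Char)) (nl : List Char) (hgs : ∀ g ∈ gs, '-' ∉ g) :
    pvLoopA gs nl = gs.contains (nl.takeWhile (fun c => c != '-')) := by
  induction gs with
  | nil => simp [pvLoopA]
  | cons g rest ih =>
    rw [pvLoopA]
    have hkey := pv_key nl g (hgs g (by simp))
    rw [show (if (nl == g || PySem.Chars.startswith nl (g ++ ['-'])) = true then true
          else pvLoopA rest nl)
        = ((nl == g || PySem.Chars.startswith nl (g ++ ['-'])) || pvLoopA rest nl) by
      cases (nl == g || PySem.Chars.startswith nl (g ++ ['-'])) <;> simp]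
    rw [hkey, ih (fun g' hg' => hgs g' (by simp [hg']))]
    rcases eq_or_ne (List.takeWhile (fun c => c != '-') nl) g with hgt | hgt
    · simp [hgt]
    · simp only [beq_eq_false_iff_ne.mpr hgt, List.contains_cons, Bool.false_or]

-- ===== VERDICT (by name: the statement is the Claim_ definition above) =====
theorem is_generic_name_py_spec : Claim_equal_is_generic_name_py := by
  intro name _
  unfold Spec_is_generic_name_py is_generic_name_py is_generic_name_py_alt
  set nl := PySem.Chars.lower name.toList with hnl
  by_cases hdig : PySem.Chars.strIsdigit (PySem.Chars.replace nl ['.'] []) = true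
  · simp [hdig]
  · simp only [hdig, if_false, Bool.false_eq_true]
    rw [pv_loop_eq pvGenericNamesA nl (by decide)]
    rw [pv_head_eq nl]
    have hset : pvGenericSet = pvGenericNamesA := by decide
    simp [PySem.Set.contains, hset]
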